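-- pv_equiv track=rewrite | github.com/miinhho/field_network | src/ffrag/flow/control.py | _extract_cycle
-- ===== SOURCE A (Python) =====
-- def _extract_cycle(u: str, v: str, parent: dict[str, str | None]) -> list[str]:
--     path_u = []
--     x = u
--     while x is not None:
--         path_u.append(x)
--         x = parent.get(x)
--     path_v = []
--     y = v
--     while y is not None:
--         path_v.append(y)
--         y = parent.get(y)
--     set_u = set(path_u)
--     lca = next((node for node in path_v if node in set_u), None)
--     if lca is None:
--         return []
--     cycle = []
--     x = u
--     while x != lca and x is not None:
--         cycle.append(x)
--         x = parent.get(x)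
--     cycle.append(lca)
--     rev = []
--     y = v
--     while y != lca and y is not None:
--         rev.append(y)
--         y = parent.get(y)
--     cycle.extend(reversed(rev))
--     if len(cycle) != len(set(cycle)):
--         return []
--     return cycle
-- ===== SOURCE B (Python) =====
-- def _extract_cycle(u: str, v: str, parent: dict[str, str | None]) -> list[str]:
--     # Classic LCA by depth alignment: measure the two chain depths, advance the
--     # deeper pointer to the common depth, then walk both pointers in lockstep
--     # until they coincide.  No ancestor set, no membership tests, no re-walks.
--     def depth(x):
--         d = 0
--         while x is not None:
--             d += 1
--             x = parent.get(x)
--         return d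
--
--     du, dv = depth(u), depth(v)
--     x, y = u, v
--     cu, cv = [], []
--     for _ in range(du - dv):
--         cu.append(x)
--         x = parent.get(x)
--     for _ in range(dv - du):
--         cv.append(y)
--         y = parent.get(y)
--     while x != y:
--         cu.append(x)
--         x = parent.get(x)
--         cv.append(y)
--         y = parent.get(y)
--     if x is None:
--         return []
--     cycle = cu + [x] + cv[::-1]
--     return cycle if len(cycle) == len(set(cycle)) else []
-- ===== Notes on version B (the rewrite author's own statement) =====
-- stated objective: alternative
-- what changed: B finds the cycle by the classic linked-list-intersection technique: compute both parent-chain depths, advance the deeper pointer by the depth difference, then move both pointers in lockstep until they coincide (the meeting point is the LCA), collecting the two sides of the cycle along the way - no ancestor set, no membership tests, no reconstruction re-walks.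
import Mathlib
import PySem

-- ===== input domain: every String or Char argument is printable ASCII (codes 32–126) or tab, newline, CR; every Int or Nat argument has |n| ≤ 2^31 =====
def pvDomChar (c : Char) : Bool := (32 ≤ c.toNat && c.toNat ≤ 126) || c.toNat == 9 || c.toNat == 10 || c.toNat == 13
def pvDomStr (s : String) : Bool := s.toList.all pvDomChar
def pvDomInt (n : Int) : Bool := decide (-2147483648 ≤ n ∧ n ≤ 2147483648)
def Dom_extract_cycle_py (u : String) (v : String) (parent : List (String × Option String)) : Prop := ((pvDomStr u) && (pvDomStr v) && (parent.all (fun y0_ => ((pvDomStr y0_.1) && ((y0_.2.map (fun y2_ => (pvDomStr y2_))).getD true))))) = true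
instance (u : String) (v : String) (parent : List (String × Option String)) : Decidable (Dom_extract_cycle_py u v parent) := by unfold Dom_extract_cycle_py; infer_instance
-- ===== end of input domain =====

-- B replaces A's ancestor-set + scan + two reconstruction re-walks by the classic
-- linked-list-intersection algorithm: measure both chain depths, advance the deeper
-- pointer by the difference, then move both pointers in lockstep until they meet
-- (objective: alternative algorithm, same asymptotic cost).

-- ===== PORT A =====
-- parent.get(x): dict is an assoc list, lookup = first match; missing key gives None,
-- and a present key may itself map to None, so the two collapse to Option String.
def pvGetParent (parent : List (String × Option String)) (x : String) : Option String :=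
  match parent.find? (fun kv => kv.1 == x) with
  | none => none
  | some kv => kv.2

-- 'while x is not None: path.append(x); x = parent.get(x)' — fuel parent.length+1 is a pure
-- totality guard: whenever the Python loop terminates, the chain reaches None within that
-- many steps (its nodes are distinct keys of parent), so the fuel never runs out there.
def pvWalk (parent : List (String × Option String)) : Nat → String → List String
  | 0, _ => []
  | Nat.succ f, x =>
    x :: (match pvGetParent parent x with
          | none => []
          | some y => pvWalk parent f y)

-- 'while x != lca and x is not None: cycle.append(x); x = parent.get(x)'
def pvCyc (parent : List (String × Option String)) (lca : String) : Nat → Option String → List String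
  | 0, _ => []
  | Nat.succ _, none => []
  | Nat.succ f, some x =>
    if x = lca then [] else x :: pvCyc parent lca f (pvGetParent parent x)

def extract_cycle_py (u : String) (v : String) (parent : List (String × Option String)) : List String :=
  let N := parent.length + 1
  let path_u := pvWalk parent N u
  let path_v := pvWalk parent N v
  let set_u := PySem.Set.ofList path_u
  -- lca = next((node for node in path_v if node in set_u), None)
  match path_v.find? (fun node => PySem.Set.contains set_u node) with
  | none => []
  | some lca =>
    let cycle := pvCyc parent lca N (some u) ++ [lca] ++ (pvCyc parent lca N (some v)).reverse
    if cycle.length ≠ (PySem.Set.ofList cycle).length then [] else cycle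

-- ===== PORT B =====
-- 'd = 0; while x is not None: d += 1; x = parent.get(x); return d' (same fuel guard).
def pvDepth (parent : List (String × Option String)) : Nat → Option String → Nat
  | 0, _ => 0
  | Nat.succ _, none => 0
  | Nat.succ f, some x => 1 + pvDepth parent f (pvGetParent parent x)

-- 'for _ in range(k): cu.append(x); x = parent.get(x)' — k ≤ chain depth whenever the
-- chains terminate, so the pointer stays non-None there; the none branch is unreachable then.
def pvAdvance (parent : List (String × Option String)) : Nat → Option String → (List String × Option String)
  | 0, x => ([], x)
  | Nat.succ _, none => ([], none)
  | Nat.succ k, some a =>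
    let r := pvAdvance parent k (pvGetParent parent a)
    (a :: r.1, r.2)

-- 'while x != y: cu.append(x); x = parent.get(x); cv.append(y); y = parent.get(y)'
-- After depth alignment both pointers are at equal depth, so they reach None together;
-- the mixed some/none branch is unreachable on terminating chains, as is fuel exhaustion.
def pvLock (parent : List (String × Option String)) : Nat → Option String → Option String → (List String × List String × Option String)
  | 0, x, _ => ([], [], x)
  | Nat.succ f, x, y =>
    if x = y then ([], [], x)
    else match x, y with
      | some a, some b =>
        let r := pvLock parent f (pvGetParent parent a) (pvGetParent parent b)
        (a :: r.1, b :: r.2.1, r.2.2)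
      | _, _ => ([], [], none)

def extract_cycle_py_alt (u : String) (v : String) (parent : List (String × Option String)) : List String :=
  let N := parent.length + 1
  let du := pvDepth parent N (some u)
  let dv := pvDepth parent N (some v)
  let au := pvAdvance parent (du - dv) (some u)
  let av := pvAdvance parent (dv - du) (some v)
  let lk := pvLock parent N au.2 av.2
  match lk.2.2 with
  | none => []
  | some l =>
    let cycle := (au.1 ++ lk.1) ++ [l] ++ (av.1 ++ lk.2.1).reverse
    if cycle.length = (PySem.Set.ofList cycle).length then cycle else []

-- ===== PRECONDITION & SPEC =====
-- One parent-pointer step as a plain (non-recursive) map on Option String.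
def pvStep (parent : List (String × Option String)) : Option String → Option String :=
  fun o => o.bind (pvGetParent parent)

-- Pre_ = exactly the inputs on which Python A returns: both while-loops terminate, i.e. the
-- parent chains from u and from v reach None (A and B loop FOREVER otherwise, so nothing is
-- excluded here that A returns on).  Closed form: a terminating chain visits distinct keys of
-- parent, hence has at most parent.length steps, so termination ⟺ the (parent.length+1)-fold
-- iterate of the step map is None.
def Pre_extract_cycle_py (u : String) (v : String) (parent : List (String × Option String)) : Prop :=
  (pvStep parent)^[parent.length + 1] (some u) = none ∧ (pvStep parent)^[parent.length + 1] (some v) = none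

instance (u : String) (v : String) (parent : List (String × Option String)) : Decidable (Pre_extract_cycle_py u v parent) := by unfold Pre_extract_cycle_py; infer_instance

def pvWitness_extract_cycle_py : String × String × (List (String × Option String)) :=
  ("a", "b", [("a", some "c"), ("b", some "c"), ("c", none)])

def Spec_extract_cycle_py (u : String) (v : String) (parent : List (String × Option String)) (out : List String) : Prop := out = extract_cycle_py_alt u v parent
instance (u : String) (v : String) (parent : List (String × Option String)) (out : List String) : Decidable (Spec_extract_cycle_py u v parent out) := by unfold Spec_extract_cycle_py; infer_instance

-- ===== CLAIM (what is proved, stated in full; the proofs are below) =====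
def Claim_equal_extract_cycle_py : Prop := ∀ (u : String) (v : String) (parent : List (String × Option String)), Dom_extract_cycle_py u v parent → Pre_extract_cycle_py u v parent → Spec_extract_cycle_py u v parent (extract_cycle_py u v parent)

-- ===== LEMMAS AND PROOFS =====

-- l is the terminating parent chain starting at x.
inductive PChain (parent : List (String × Option String)) : String → List String → Prop
  | last (x : String) : pvGetParent parent x = none → PChain parent x [x]
  | step (x y : String) (l : List String) :
      pvGetParent parent x = some y → PChain parent y l → PChain parent x (x :: l)

theorem PChain.head_eq {parent : List (String × Option String)} {x : String} {l : List String}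
    (h : PChain parent x l) : ∃ t, l = x :: t := by
  cases h with
  | last _ _ => exact ⟨[], rfl⟩
  | step _ _ l _ _ => exact ⟨l, rfl⟩

theorem pvIter_chain (parent : List (String × Option String)) :
    ∀ (f : Nat) (x : String), (pvStep parent)^[f] (some x) = none →
      ∃ l, PChain parent x l ∧ l.length ≤ f := by
  intro f
  induction f with
  | zero => intro x h; simp at h
  | succ f ih =>
    intro x h
    rw [Function.iterate_succ_apply] at h
    cases hg : pvGetParent parent x with
    | none => exact ⟨[x], PChain.last x hg, by simp⟩
    | some y =>
      have h' : (pvStep parent)^[f] (some y) = none := by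
        simpa [pvStep, hg] using h
      obtain ⟨l, hc, hl⟩ := ih y h'
      exact ⟨x :: l, PChain.step x y l hg hc, by simpa using hl⟩

theorem PChain.walk_eq {parent : List (String × Option String)} {x : String} {l : List String}
    (h : PChain parent x l) : ∀ f, l.length ≤ f → pvWalk parent f x = l := by
  induction h with
  | last x hg =>
    intro f hf
    cases f with
    | zero => simp at hf
    | succ f => simp [pvWalk, hg]
  | step x y l hg _ ih =>
    intro f hf
    cases f with
    | zero => simp at hf
    | succ f =>
      have : l.length ≤ f := by simpa using hf
      simp [pvWalk, hg, ih f this]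

theorem pvDepth_none (parent : List (String × Option String)) :
    ∀ f, pvDepth parent f none = 0 := by
  intro f; cases f <;> rfl

theorem PChain.depth_eq {parent : List (String × Option String)} {x : String} {l : List String}
    (h : PChain parent x l) : ∀ f, l.length ≤ f → pvDepth parent f (some x) = l.length := by
  induction h with
  | last x hg =>
    intro f hf
    cases f with
    | zero => simp at hf
    | succ f => simp [pvDepth, hg, pvDepth_none]
  | step x y l hg _ ih =>
    intro f hf
    cases f with
    | zero => simp at hf
    | succ f =>
      have : l.length ≤ f := by simpa using hf
      simp [pvDepth, hg, ih f this]; omega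

theorem PChain.unique {parent : List (String × Option String)} {x : String} {l₁ l₂ : List String}
    (h₁ : PChain parent x l₁) (h₂ : PChain parent x l₂) : l₁ = l₂ := by
  induction h₁ generalizing l₂ with
  | last x hg =>
    cases h₂ with
    | last _ _ => rfl
    | step _ y l hg' _ => rw [hg] at hg'; cases hg'
  | step x y l hg hc ih =>
    cases h₂ with
    | last _ hg' => rw [hg] at hg'; cases hg'
    | step _ y' l' hg' hc' =>
      rw [hg] at hg'
      cases hg'
      rw [ih hc']

theorem PChain.cons_inv {parent : List (String × Option String)} {x a : String} {l : List String}
    (h : PChain parent x (a :: l)) :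
    x = a ∧ (l = [] ∨ ∃ y, pvGetParent parent x = some y ∧ PChain parent y l) := by
  cases h with
  | last _ _ => exact ⟨rfl, Or.inl rfl⟩
  | step _ y l hg hc => exact ⟨rfl, Or.inr ⟨y, hg, hc⟩⟩

-- The suffix of a chain starting at any occurrence of z is itself the chain of z.
theorem PChain.suffix {parent : List (String × Option String)} :
    ∀ (pre : List String) {x z : String} {suf : List String},
      PChain parent x (pre ++ z :: suf) → PChain parent z (z :: suf) := by
  intro pre
  induction pre with
  | nil =>
    intro x z suf h
    obtain ⟨t, ht⟩ := h.head_eq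
    simp at ht
    obtain ⟨rfl, rfl⟩ := ht
    exact h
  | cons p pre ih =>
    intro x z suf h
    obtain ⟨rfl, h2⟩ := h.cons_inv
    rcases h2 with he | ⟨y, hg, hc⟩
    · simp at he
    · exact ih hc

theorem pvAdvance_chain {parent : List (String × Option String)} :
    ∀ (k : Nat) {x : String} {l : List String}, PChain parent x l → k < l.length →
      pvAdvance parent k (some x) = (l.take k, l[k]?) := by
  intro k
  induction k with
  | zero =>
    intro x l h _
    obtain ⟨t, rfl⟩ := h.head_eq
    simp [pvAdvance]
  | succ k ih =>
    intro x l h hk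
    cases h with
    | last _ hg => simp at hk
    | step x y l' hg hc =>
      have hk' : k < l'.length := by simpa using hk
      simp [pvAdvance, hg, ih hc hk']

-- Lockstep walking of two equal-length chains, as a pure list recursion.
def lockSpec : List String → List String → (List String × List String × Option String)
  | a :: la, b :: lb =>
    if a = b then ([], [], some a)
    else
      let r := lockSpec la lb
      (a :: r.1, b :: r.2.1, r.2.2)
  | _, _ => ([], [], none)

theorem pvLock_none (parent : List (String × Option String)) :
    ∀ (f : Nat) (y : Option String), pvLock parent f none y = ([], [], none) := by
  intro f y
  cases f with
  | zero => rfl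
  | succ f => cases y <;> rfl

theorem pvLock_eq_lockSpec {parent : List (String × Option String)} :
    ∀ {a : String} {la : List String}, PChain parent a la →
    ∀ {b : String} {lb : List String}, PChain parent b lb →
      la.length = lb.length → ∀ f, la.length ≤ f →
      pvLock parent f (some a) (some b) = lockSpec la lb := by
  intro a la h
  induction h with
  | last x hg =>
    intro b lb hb hlen f hf
    cases f with
    | zero => simp at hf
    | succ f =>
      cases hb with
      | last b hg' =>
        by_cases hxy : x = b
        · subst hxy; simp [pvLock, lockSpec]
        · simp [pvLock, lockSpec, hxy, hg, hg', pvLock_none]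
      | step b y' l' hg' hc' =>
        obtain ⟨t, rfl⟩ := hc'.head_eq
        simp at hlen
  | step x y l hg hc ih =>
    intro b lb hb hlen f hf
    cases f with
    | zero =>
      obtain ⟨t, rfl⟩ := hc.head_eq
      simp at hf
    | succ f =>
      by_cases hxy : x = b
      · subst hxy
        obtain ⟨t, ht⟩ := hb.head_eq
        subst ht
        simp [pvLock, lockSpec]
      · cases hb with
        | last _ hg' =>
          obtain ⟨t, rfl⟩ := hc.head_eq
          simp at hlen
        | step b y' l' hg' hc' =>
          have hlen' : l.length = l'.length := by simpa using hlen
          have hf' : l.length ≤ f := by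
            obtain ⟨t, rfl⟩ := hc.head_eq
            simpa using hf
          simp [pvLock, lockSpec, hxy, hg, hg', ih hc' hlen' f hf']

-- lockSpec on pointwise-distinct equal-length lists never meets.
theorem lockSpec_no_meet :
    ∀ (la lb : List String), la.length = lb.length →
      (∀ p ∈ la.zip lb, p.1 ≠ p.2) → lockSpec la lb = (la, lb, none) := by
  intro la
  induction la with
  | nil =>
    intro lb hlen _
    cases lb with
    | nil => rfl
    | cons b lb => simp at hlen
  | cons a la ih =>
    intro lb hlen hne
    cases lb with
    | nil => simp at hlen
    | cons b lb =>
      have hab : a ≠ b := hne (a, b) (by simp)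
      have : lockSpec la lb = (la, lb, none) :=
        ih lb (by simpa using hlen) (fun p hp => hne p (by simp [hp]))
      simp [lockSpec, hab, this]

-- lockSpec meets exactly at the first aligned common element.
theorem lockSpec_meet :
    ∀ (p q : List String) (z : String) (s t : List String), p.length = q.length →
      (∀ r ∈ p.zip q, r.1 ≠ r.2) →
      lockSpec (p ++ z :: s) (q ++ z :: t) = (p, q, some z) := by
  intro p
  induction p with
  | nil =>
    intro q z s t hlen _
    cases q with
    | nil => simp [lockSpec]
    | cons b q => simp at hlen
  | cons a p ih =>
    intro q z s t hlen hne
    cases q with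
    | nil => simp at hlen
    | cons b q =>
      have hab : a ≠ b := hne (a, b) (by simp)
      have := ih q z s t (by simpa using hlen) (fun r hr => hne r (by simp [hr]))
      simp [lockSpec, hab, this]

-- Decompose a find?-success into prefix of failures, the hit, and the rest.
theorem find?_decomp {p : String → Bool} :
    ∀ {l : List String} {a : String}, l.find? p = some a →
      ∃ pre suf, l = pre ++ a :: suf ∧ (∀ x ∈ pre, p x = false) ∧ p a = true := by
  intro l
  induction l with
  | nil => intro a h; simp at h
  | cons x l ih =>
    intro a h
    by_cases hx : p x = true
    · have : x = a := by simpa [List.find?_cons, hx] using h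
      subst this
      exact ⟨[], l, rfl, by simp, hx⟩
    · have hx' : p x = false := by simpa using hx
      have htail : l.find? p = some a := by simpa [List.find?_cons, hx'] using h
      obtain ⟨pre, suf, rfl, hpre, hpa⟩ := ih htail
      exact ⟨x :: pre, suf, rfl, by
        intro y hy
        rcases List.mem_cons.mp hy with rfl | hy
        · exact hx'
        · exact hpre y hy, hpa⟩

-- Split a list at the FIRST occurrence of a via takeWhile.
theorem split_first_mem :
    ∀ (l : List String) (a : String), a ∈ l →
      ∃ suf, l = l.takeWhile (fun x => x != a) ++ a :: suf ∧ a ∉ l.takeWhile (fun x => x != a) := by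
  intro l
  induction l with
  | nil => intro a h; simp at h
  | cons x l ih =>
    intro a h
    by_cases hx : x = a
    · subst hx
      exact ⟨l, by simp [List.takeWhile], by simp [List.takeWhile]⟩
    · have hb : (x != a) = true := by simp [bne_iff_ne, hx]
      have hm : a ∈ l := by
        rcases List.mem_cons.mp h with rfl | hm
        · exact absurd rfl hx
        · exact hm
      obtain ⟨suf, he, hnm⟩ := ih a hm
      refine ⟨suf, ?_, ?_⟩
      · simpa [List.takeWhile, hb] using congrArg (x :: ·) he
      · intro hc
        rcases List.mem_cons.mp (by simpa [List.takeWhile, hb] using hc) with rfl | hc'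
        · exact hx rfl
        · exact hnm hc'

-- A's re-walk from x until lca is the takeWhile (≠ lca) of the walk from x, at any fuel.
theorem pvCyc_eq_takeWhile (parent : List (String × Option String)) (lca : String) :
    ∀ (f : Nat) (x : String),
      pvCyc parent lca f (some x) = (pvWalk parent f x).takeWhile (fun a => a != lca) := by
  intro f
  induction f with
  | zero => intro x; rfl
  | succ f ih =>
    intro x
    by_cases hx : x = lca
    · subst hx
      simp [pvCyc, pvWalk]
    · cases hg : pvGetParent parent x with
      | none =>
        have : pvCyc parent lca f none = [] := by cases f <;> rfl
        simp [pvCyc, pvWalk, hg, hx, this, List.takeWhile, bne_iff_ne]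
      | some y =>
        simp [pvCyc, pvWalk, hg, hx, bne_iff_ne, ih y]

theorem takeWhile_ne_append (a : String) :
    ∀ (pre : List String) (suf : List String), a ∉ pre →
      List.takeWhile (fun x => x != a) (pre ++ a :: suf) = pre := by
  intro pre
  induction pre with
  | nil => intro suf _; simp
  | cons p pre ih =>
    intro suf hnm
    have hp : p ≠ a := fun he => hnm (he ▸ List.mem_cons_self)
    have hb : (p != a) = true := by simp [bne_iff_ne, hp]
    have hnm' : a ∉ pre := fun hm => hnm (List.mem_cons_of_mem _ hm)
    simp [hb, ih suf hnm']

-- ===== VERDICT (by name: the statement is the Claim_ definition above) =====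
theorem extract_cycle_py_spec : Claim_equal_extract_cycle_py := by
  intro u v parent _ hpre
  obtain ⟨hu, hv⟩ := hpre
  obtain ⟨lu, hcu, hlu⟩ := pvIter_chain parent (parent.length + 1) u hu
  obtain ⟨lv, hcv, hlv⟩ := pvIter_chain parent (parent.length + 1) v hv
  have hwu : pvWalk parent (parent.length + 1) u = lu := hcu.walk_eq _ hlu
  have hwv : pvWalk parent (parent.length + 1) v = lv := hcv.walk_eq _ hlv
  have hdu : pvDepth parent (parent.length + 1) (some u) = lu.length := hcu.depth_eq _ hlu
  have hdv : pvDepth parent (parent.length + 1) (some v) = lv.length := hcv.depth_eq _ hlv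
  have hu1 : 1 ≤ lu.length := by obtain ⟨t, rfl⟩ := hcu.head_eq; simp
  have hv1 : 1 ≤ lv.length := by obtain ⟨t, rfl⟩ := hcv.head_eq; simp
  have hk : lu.length - lv.length < lu.length := by omega
  have hk' : lv.length - lu.length < lv.length := by omega
  have hadvu := pvAdvance_chain (lu.length - lv.length) hcu hk
  have hadvv := pvAdvance_chain (lv.length - lu.length) hcv hk'
  rw [List.getElem?_eq_getElem hk] at hadvu
  rw [List.getElem?_eq_getElem hk'] at hadvv
  have hchu : PChain parent (lu[lu.length - lv.length]'hk) (lu.drop (lu.length - lv.length)) := by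
    have h1 : lu = lu.take (lu.length - lv.length) ++
        (lu[lu.length - lv.length]'hk) :: lu.drop (lu.length - lv.length + 1) := by
      rw [List.getElem_cons_drop, List.take_append_drop]
    have h2 := PChain.suffix (lu.take (lu.length - lv.length)) (h1 ▸ hcu)
    rwa [List.getElem_cons_drop] at h2
  have hchv : PChain parent (lv[lv.length - lu.length]'hk') (lv.drop (lv.length - lu.length)) := by
    have h1 : lv = lv.take (lv.length - lu.length) ++
        (lv[lv.length - lu.length]'hk') :: lv.drop (lv.length - lu.length + 1) := by
      rw [List.getElem_cons_drop, List.take_append_drop]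
    have h2 := PChain.suffix (lv.take (lv.length - lu.length)) (h1 ▸ hcv)
    rwa [List.getElem_cons_drop] at h2
  have hlen : (lu.drop (lu.length - lv.length)).length = (lv.drop (lv.length - lu.length)).length := by
    simp; omega
  have hfuel : (lu.drop (lu.length - lv.length)).length ≤ parent.length + 1 := by
    simp; omega
  have hlock := pvLock_eq_lockSpec hchu hchv hlen (parent.length + 1) hfuel
  unfold Spec_extract_cycle_py extract_cycle_py extract_cycle_py_alt
  simp only [hwu, hwv, hdu, hdv, hadvu, hadvv, hlock]
  cases hf : lv.find? (fun node => PySem.Set.contains (PySem.Set.ofList lu) node) with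
  | none =>
    have hno : ∀ z ∈ lv, z ∉ lu := by
      intro z hz hzu
      have := List.find?_eq_none.mp hf z hz
      simp [PySem.Set.mem_ofList] at this
      exact this hzu
    have hns : lockSpec (lu.drop (lu.length - lv.length)) (lv.drop (lv.length - lu.length)) =
        (lu.drop (lu.length - lv.length), lv.drop (lv.length - lu.length), none) := by
      apply lockSpec_no_meet _ _ hlen
      intro p hp
      obtain ⟨h1, h2⟩ := List.of_mem_zip hp
      exact fun he => hno p.2 (List.mem_of_mem_drop h2) (he ▸ List.mem_of_mem_drop h1)
    simp [hns]
  | some lca =>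
    obtain ⟨preV, sufV, hlveq, hpreV, hlcaT⟩ := find?_decomp hf
    have hmemu : lca ∈ lu := by
      simpa [PySem.Set.mem_ofList] using hlcaT
    obtain ⟨sufU, hlueq, hnmU⟩ := split_first_mem lu lca hmemu
    set preU := lu.takeWhile (fun x => x != lca) with hpreU
    have hpreVnotu : ∀ x ∈ preV, x ∉ lu := by
      intro x hx hxu
      have := hpreV x hx
      simp [PySem.Set.mem_ofList] at this
      exact this hxu
    -- the two suffixes after lca coincide (the chain of lca is unique)
    have hsU : PChain parent lca (lca :: sufU) := PChain.suffix _ (hlueq ▸ hcu)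
    have hsV : PChain parent lca (lca :: sufV) := PChain.suffix _ (hlveq ▸ hcv)
    have hsuf : sufU = sufV := by
      have := PChain.unique hsU hsV
      simpa using this
    subst hsuf
    have hlulen : lu.length = preU.length + 1 + sufU.length := by
      have := congrArg List.length hlueq
      simp at this; omega
    have hlvlen : lv.length = preV.length + 1 + sufU.length := by
      have := congrArg List.length hlveq
      simp at this; omega
    have hkle : lu.length - lv.length ≤ preU.length := by omega
    have hkle' : lv.length - lu.length ≤ preV.length := by omega
    have hdropu : lu.drop (lu.length - lv.length) =
        preU.drop (lu.length - lv.length) ++ lca :: sufU := by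
      have h0 := List.drop_append_of_le_length (l₂ := lca :: sufU) hkle
      rw [← hlueq] at h0
      exact h0
    have hdropv : lv.drop (lv.length - lu.length) =
        preV.drop (lv.length - lu.length) ++ lca :: sufU := by
      have h0 := List.drop_append_of_le_length (l₂ := lca :: sufU) hkle'
      rw [← hlveq] at h0
      exact h0
    have hms : lockSpec (lu.drop (lu.length - lv.length)) (lv.drop (lv.length - lu.length)) =
        (preU.drop (lu.length - lv.length), preV.drop (lv.length - lu.length), some lca) := by
      rw [hdropu, hdropv]
      apply lockSpec_meet
      · simp; omega
      · intro r hr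
        obtain ⟨h1, h2⟩ := List.of_mem_zip hr
        have h1' : r.1 ∈ lu := by
          rw [hlueq]
          exact List.mem_append_left _ (List.mem_of_mem_drop h1)
        exact fun he => hpreVnotu r.2 (List.mem_of_mem_drop h2) (he ▸ h1')
    have htakeu : lu.take (lu.length - lv.length) = preU.take (lu.length - lv.length) := by
      have h0 := List.take_append_of_le_length (l₂ := lca :: sufU) hkle
      rw [← hlueq] at h0
      exact h0
    have htakev : lv.take (lv.length - lu.length) = preV.take (lv.length - lu.length) := by
      have h0 := List.take_append_of_le_length (l₂ := lca :: sufU) hkle'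
      rw [← hlveq] at h0
      exact h0
    have hAcu : pvCyc parent lca (parent.length + 1) (some u) = preU := by
      rw [pvCyc_eq_takeWhile, hwu]
    have hAcv : pvCyc parent lca (parent.length + 1) (some v) = preV := by
      rw [pvCyc_eq_takeWhile, hwv]
      have h0 := takeWhile_ne_append lca preV sufU fun hm => hpreVnotu lca hm hmemu
      rw [← hlveq] at h0
      exact h0
    simp only [hms, hAcu, hAcv, htakeu, htakev, List.take_append_drop]
    split_ifs with h1 h2
    · rfl
    · rfl
    · exact absurd (not_ne_iff.mp h1) h2
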